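-- pv_equiv track=rewrite | github.com/Jaeyeop-Jung/CodingTest | 프로그래머스/Lv2/Lv2. [3차] n진수 게임.py | convert
-- ===== SOURCE A (Python) =====
-- def convert(n, number):
--     alpha = ['A', 'B', 'C', 'D', 'E', 'F']
--     result = ''
--     while number > 0:
--         number, r = divmod(number, n)
--         if 10 <= r < 16:
--             result = alpha[r - 10] + result
--         else:
--             result = str(r) + result
--     if result == '':
--         return '0'
--     return result
-- ===== SOURCE B (Python) =====
-- DIGITS = '0123456789ABCDEF'
--
--
-- def convert(n, number):
--     if number <= 0:
--         return '0'
--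
--     def helper(x):
--         if x <= 0:
--             return ''
--         q, r = divmod(x, n)
--         return helper(q) + (DIGITS[r] if 0 <= r < 16 else str(r))
--
--     return helper(number)
-- ===== Notes on version B (the rewrite author's own statement) =====
-- stated objective: simpler
-- what changed: Replaces the accumulator while-loop that prepends digits with a recursive helper that builds the string left-to-right (helper(x//n) + digit), with a single up-front guard for number <= 0.
import Mathlib
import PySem

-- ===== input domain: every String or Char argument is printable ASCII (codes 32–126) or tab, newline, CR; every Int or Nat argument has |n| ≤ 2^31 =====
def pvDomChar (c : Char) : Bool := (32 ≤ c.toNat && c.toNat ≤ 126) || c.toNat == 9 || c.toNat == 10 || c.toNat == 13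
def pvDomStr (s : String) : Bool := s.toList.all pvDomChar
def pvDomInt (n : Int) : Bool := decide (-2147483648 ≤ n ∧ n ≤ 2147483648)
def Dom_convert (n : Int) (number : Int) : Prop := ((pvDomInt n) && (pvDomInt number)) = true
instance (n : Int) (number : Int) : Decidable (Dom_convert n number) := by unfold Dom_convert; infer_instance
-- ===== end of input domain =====

-- B replaces A's digit-prepending while-loop by a recursive helper that builds the
-- string left-to-right (helper(x // n) + digit), guarding number <= 0 up front; same cost.

-- ===== PORT A =====
-- A's while-loop, state (number, result); fuel number.toNat + 1 is enough on Pre_: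
-- for n ≥ 2 the quotient strictly decreases, for n ≤ 0 the quotient is ≤ 0 after one step.
def convertLoopA (fuel : Nat) (n : Int) (number : Int) (result : String) : String :=
  match fuel with
  | 0 => result
  | fuel + 1 =>
    if number > 0 then
      let q := PySem.Int.floordiv number n
      let r := PySem.Int.mod number n
      convertLoopA fuel n q
        ((if 10 ≤ r ∧ r < 16 then
            PySem.List.pyGetD ["A", "B", "C", "D", "E", "F"] (r - 10) ""
          else
            PySem.Int.toStr r) ++ result)
    else result

def convert (n : Int) (number : Int) : String :=
  let result := convertLoopA (number.toNat + 1) n number ""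
  if result = "" then "0" else result

-- ===== PORT B =====
-- Source B's recursive helper(x); same fuel bound, exact for the same reason as A's loop.
def convertHelperB (fuel : Nat) (n : Int) (x : Int) : String :=
  match fuel with
  | 0 => ""
  | fuel + 1 =>
    if x ≤ 0 then ""
    else
      let q := PySem.Int.floordiv x n
      let r := PySem.Int.mod x n
      convertHelperB fuel n q ++
        (if 0 ≤ r ∧ r < 16 then
          ((PySem.Str.pyGet? "0123456789ABCDEF" r).map (fun c => c.toString)).getD ""
        else PySem.Int.toStr r)

def convert_alt (n : Int) (number : Int) : String :=
  if number ≤ 0 then "0" else convertHelperB (number.toNat + 1) n number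

-- ===== PRECONDITION & SPEC =====
-- Pre_ excludes exactly the inputs where A does not return: n = 0 with number > 0
-- (ZeroDivisionError) and n = 1 with number > 0 (the while-loop never terminates).
def Pre_convert (n : Int) (number : Int) : Prop := number ≤ 0 ∨ (n ≠ 0 ∧ n ≠ 1)
instance (n : Int) (number : Int) : Decidable (Pre_convert n number) := by
  unfold Pre_convert; infer_instance

def pvWitness_convert : Int × Int := (2, 10)

def Spec_convert (n : Int) (number : Int) (out : String) : Prop := out = convert_alt n number
instance (n : Int) (number : Int) (out : String) : Decidable (Spec_convert n number out) := by
  unfold Spec_convert; infer_instance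

-- ===== CLAIM (what is proved, stated in full; the proofs are below) =====
def Claim_equal_convert : Prop := ∀ (n : Int) (number : Int), Dom_convert n number → Pre_convert n number → Spec_convert n number (convert n number)

-- ===== LEMMAS AND PROOFS =====

theorem convertLoopA_nonpos (fuel : Nat) (n number : Int) (result : String)
    (h : number ≤ 0) : convertLoopA fuel n number result = result := by
  cases fuel <;> simp [convertLoopA, h]

theorem convertHelperB_nonpos (fuel : Nat) (n x : Int)
    (h : x ≤ 0) : convertHelperB fuel n x = "" := by
  cases fuel <;> simp [convertHelperB, h]

-- A's digit (alpha lookup / str(r)) equals B's digit (DIGITS lookup / str(r)).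
theorem digit_eq (r : Int) :
    (if 10 ≤ r ∧ r < 16 then
        PySem.List.pyGetD ["A", "B", "C", "D", "E", "F"] (r - 10) ""
      else PySem.Int.toStr r)
    = (if 0 ≤ r ∧ r < 16 then
        ((PySem.Str.pyGet? "0123456789ABCDEF" r).map (fun c => c.toString)).getD ""
      else PySem.Int.toStr r) := by
  by_cases h : 0 ≤ r ∧ r < 16
  · obtain ⟨h0, h1⟩ := h
    interval_cases r <;> decide
  · have h' : ¬ (10 ≤ r ∧ r < 16) := by omega
    simp [h, h']

theorem floordiv_lt_self (a b : Int) (ha : 0 < a) (hb : 2 ≤ b) :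
    PySem.Int.floordiv a b < a := by
  rw [PySem.Int.floordiv, Int.fdiv_eq_ediv]
  have h2 : a / b < a := by
    rw [Int.ediv_lt_iff_lt_mul (by omega)]
    nlinarith
  split_ifs <;> omega

theorem floordiv_nonpos (a b : Int) (ha : 0 < a) (hb : b ≤ 0) :
    PySem.Int.floordiv a b ≤ 0 := by
  rw [PySem.Int.floordiv, Int.fdiv_eq_ediv]
  have h2 : a / b ≤ 0 := Int.ediv_nonpos_of_nonneg_of_nonpos (by omega) hb
  split_ifs <;> omega

-- Main invariant: A's loop from state (number, result) computes B's helper(number) ++ result.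
theorem loop_eq_helper (fuel : Nat) (n number : Int) (result : String)
    (hn : n ≠ 1) (hf : number.toNat < fuel) :
    convertLoopA fuel n number result = convertHelperB fuel n number ++ result := by
  induction fuel generalizing number result with
  | zero => omega
  | succ fuel ih =>
    by_cases h : number > 0
    · have hnp : ¬ number ≤ 0 := by omega
      rw [convertLoopA, convertHelperB]
      simp only [if_pos h, if_neg hnp]
      rw [digit_eq]
      set q := PySem.Int.floordiv number n with hq
      set d := (if 0 ≤ PySem.Int.mod number n ∧ PySem.Int.mod number n < 16 then
          ((PySem.Str.pyGet? "0123456789ABCDEF" (PySem.Int.mod number n)).map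
            (fun c => c.toString)).getD ""
        else PySem.Int.toStr (PySem.Int.mod number n)) with hd
      by_cases hqp : q > 0
      · have hq2 : 2 ≤ n := by
          rcases lt_trichotomy n 0 with h1 | h1 | h1
          · exact absurd (floordiv_nonpos number n h (by omega)) (by omega)
          · exact absurd (floordiv_nonpos number n h (by omega)) (by omega)
          · rcases (by omega : n = 1 ∨ 2 ≤ n) with h2 | h2
            · exact absurd h2 hn
            · exact h2
        have hlt : q < number := floordiv_lt_self number n h hq2
        rw [ih q (d ++ result) (by omega), String.append_assoc]
      · rw [convertLoopA_nonpos fuel n q (d ++ result) (by omega),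
            convertHelperB_nonpos fuel n q (by omega)]
        simp
    · rw [convertLoopA_nonpos _ _ _ _ (by omega),
          convertHelperB_nonpos _ _ _ (by omega)]
      simp

theorem toDigitsCore_ne_nil (b : Nat) :
    ∀ (f n : Nat) (acc : List Char), acc ≠ [] → Nat.toDigitsCore b f n acc ≠ [] := by
  intro f
  induction f with
  | zero => intro n acc h; simpa [Nat.toDigitsCore] using h
  | succ f ih =>
    intro n acc h
    rw [Nat.toDigitsCore]
    split
    · simp
    · exact ih _ _ (by simp)

theorem toStr_ne_empty (r : Int) : PySem.Int.toStr r ≠ "" := by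
  have key : ∀ m : Nat, Nat.toDigits 10 m ≠ [] := by
    intro m
    rw [Nat.toDigits, Nat.toDigitsCore]
    split
    · simp
    · exact toDigitsCore_ne_nil 10 _ _ _ (by simp)
  rw [PySem.Int.toStr]
  intro hcontra
  have : PySem.Int.toChars r = [] := by
    have h2 := congrArg String.toList hcontra
    rw [String.toList_ofList] at h2
    simpa using h2
  rw [PySem.Int.toChars] at this
  split at this
  · simp at this
  · exact key _ this

theorem digit_ne_empty (r : Int) :
    (if 0 ≤ r ∧ r < 16 then
        ((PySem.Str.pyGet? "0123456789ABCDEF" r).map (fun c => c.toString)).getD ""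
      else PySem.Int.toStr r) ≠ "" := by
  by_cases h : 0 ≤ r ∧ r < 16
  · obtain ⟨h0, h1⟩ := h
    interval_cases r <;> decide
  · simpa [h] using toStr_ne_empty r

theorem helperB_ne_empty (fuel : Nat) (n x : Int) (hx : 0 < x) (hf : x.toNat < fuel) :
    convertHelperB fuel n x ≠ "" := by
  cases fuel with
  | zero => omega
  | succ fuel =>
    rw [convertHelperB]
    simp only [if_neg (by omega : ¬ x ≤ 0)]
    intro hcontra
    have h2 := congrArg String.toList hcontra
    simp only [String.toList_append] at h2
    have := digit_ne_empty (PySem.Int.mod x n)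
    rcases List.append_eq_nil_iff.mp h2 with ⟨_, hdig⟩
    exact this (by
      apply String.toList_injective
      simpa using hdig)

-- ===== VERDICT (by name: the statement is the Claim_ definition above) =====
theorem convert_spec : Claim_equal_convert := by
  unfold Claim_equal_convert
  intro n number _hdom hpre
  unfold Spec_convert convert convert_alt
  by_cases h : number ≤ 0
  · rw [convertLoopA_nonpos _ _ _ _ h]
    simp [h]
  · have hn : n ≠ 1 := by
      rcases hpre with h1 | h1
      · omega
      · exact h1.2
    rw [loop_eq_helper _ n number "" hn (by omega)]
    have hne := helperB_ne_empty (number.toNat + 1) n number (by omega) (by omega)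
    simp [h, hne]
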